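/- GENERATED by farm/mkstatement.py from design/units.tsv (unit `prog_main`) and the Specs of Toy/Spec/*.lean — do not edit.
   THE STATEMENT of the proof unit `prog_main`: the function `prog_main` (42 instructions) satisfies its contract,
   given the contracts of its callees. What the names mean: ProgX/Base/Spec/Basic.lean. The theorem to prove:
   `theorem prog_main_ok : Toy.Spec.prog_main.Statement`. -/
import Toy.Code
import Toy.Dec.All
import Toy.Labels
import Toy.Spec.Toy
namespace Toy.Spec.prog_main
open X86 X86.User Asan

/-- The statement of unit `prog_main`. -/
def Statement : Prop :=
  ∀ (Lay : Layout) (_hLay : Lay.hi = 0x1000000) (μ : Microarch) (_hμ : UserX.MicroOK μ) (u₀ : State)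
    (_hcode : HasCodeNat Lay u₀ Toy.L.prog_main.entry Toy.Code.code_prog_main.nat Toy.L.prog_main.size)
    (_h_clamp_length : ∀ (others : List Obj) (frames : List (Nat × FrameLayout)), Calls Lay μ ProgX.Base.WayInv (ProgX.Base.conv u₀) Toy.L.clamp_length.entry (Toy.Spec.clamp_length.spec others frames))
    (_h_fill_buffer : ∀ (others : List Obj) (frames : List (Nat × FrameLayout)), Calls Lay μ ProgX.Base.WayInv (ProgX.Base.conv u₀) Toy.L.fill_buffer.entry (Toy.Spec.fill_buffer.spec others frames))
    (_h_weighted_sum : ∀ (others : List Obj) (frames : List (Nat × FrameLayout)), Calls Lay μ ProgX.Base.WayInv (ProgX.Base.conv u₀) Toy.L.weighted_sum.entry (Toy.Spec.weighted_sum.spec others frames))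
    (_h_store_sum : ∀ (others : List Obj) (frames : List (Nat × FrameLayout)), Calls Lay μ ProgX.Base.WayInv (ProgX.Base.conv u₀) Toy.L.store_sum.entry (Toy.Spec.store_sum.spec others frames)),
    ∀ (others : List Obj) (frames : List (Nat × FrameLayout)), Calls Lay μ ProgX.Base.WayInv (ProgX.Base.conv u₀) Toy.L.prog_main.entry (Toy.Spec.prog_main.spec others frames)

end Toy.Spec.prog_main
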